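-- pv_equiv track=rewrite | github.com/supergirl-os/Bird-Song-Recognition | data_csv.py | class_dict
-- ===== SOURCE A (Python) =====
-- def class_dict(tr_labels):
--     bird_dict={}
--     bird_num_dict = {}
--     for label in tr_labels:
--         if label not in bird_num_dict:
--             bird_num_dict[label] = 1
--         else:
--             bird_num_dict[label]+=1
--     for label in tr_labels:
--         if label not in bird_dict:
--             bird_dict[label] = len(bird_dict)
--         else:
--             continue
--     return bird_num_dict,bird_dict
-- ===== SOURCE B (Python) =====
-- def class_dict(tr_labels):
--     # Distinct labels first (first-occurrence order via dict.fromkeys), then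
--     # counts are computed per distinct label with list.count -- no incremental
--     # counting loop at all; the index dict enumerates the distinct labels.
--     order = list(dict.fromkeys(tr_labels))
--     bird_num_dict = {lab: tr_labels.count(lab) for lab in order}
--     bird_dict = {lab: i for i, lab in enumerate(order)}
--     return bird_num_dict, bird_dict
-- ===== Notes on version B (the rewrite author's own statement) =====
-- stated objective: alternative
-- what changed: B first dedupes the labels in first-occurrence order with dict.fromkeys, then builds the count dict by calling tr_labels.count(lab) per distinct label (per-key rescans instead of A's incremental branching count loop) and the index dict by enumerating the distinct labels; it trades A's O(n) incremental counting for an O(n*k) scan-per-distinct-key formulation.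
import Mathlib
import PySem

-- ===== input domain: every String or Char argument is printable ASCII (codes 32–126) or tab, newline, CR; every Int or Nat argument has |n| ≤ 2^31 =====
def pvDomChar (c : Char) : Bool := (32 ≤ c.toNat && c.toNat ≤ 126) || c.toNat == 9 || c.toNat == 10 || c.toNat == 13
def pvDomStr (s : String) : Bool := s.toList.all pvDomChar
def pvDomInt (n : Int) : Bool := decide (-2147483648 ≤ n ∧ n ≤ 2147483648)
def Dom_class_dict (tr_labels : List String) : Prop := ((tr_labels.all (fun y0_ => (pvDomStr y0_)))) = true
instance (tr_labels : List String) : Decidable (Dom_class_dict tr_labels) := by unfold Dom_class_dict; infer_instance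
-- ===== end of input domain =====

-- B dedupes the labels first and computes each count with list.count per distinct
-- label, instead of A's two incremental branching loops (objective: alternative).

-- ===== PORT A =====
-- two loops over tr_labels: the first counts incrementally, the second assigns
-- len(bird_dict) to unseen labels
def class_dict (tr_labels : List String) : (List (String × Int)) × (List (String × Int)) :=
  let bird_num_dict : PySem.Dict String Int :=
    tr_labels.foldl
      (fun d label =>
        if !(d.contains label) then d.insert label 1
        else d.insert label (d.getD label 0 + 1))   -- d[label] += 1 (key present in this branch)
      PySem.Dict.empty
  let bird_dict : PySem.Dict String Int :=
    tr_labels.foldl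
      (fun d label =>
        if !(d.contains label) then d.insert label ((d.size : Int))
        else d)
      PySem.Dict.empty
  (bird_num_dict.items, bird_dict.items)

-- ===== PORT B =====
-- order = list(dict.fromkeys(tr_labels)); counts via tr_labels.count(lab) per
-- distinct label; index dict via enumerate(order)
def class_dict_alt (tr_labels : List String) : (List (String × Int)) × (List (String × Int)) :=
  let order : List String := PySem.Set.ofList tr_labels
  let bird_num_dict : PySem.Dict String Int :=
    order.foldl (fun d lab => d.insert lab ((PySem.List.count tr_labels lab : Int))) PySem.Dict.empty
  let bird_dict : PySem.Dict String Int :=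
    (PySem.List.enumerate order 0).foldl (fun d p => d.insert p.2 p.1) PySem.Dict.empty
  (bird_num_dict.items, bird_dict.items)

-- ===== PRECONDITION & SPEC =====
def Spec_class_dict (tr_labels : List String) (out : (List (String × Int)) × (List (String × Int))) : Prop := out = class_dict_alt tr_labels
instance (tr_labels : List String) (out : (List (String × Int)) × (List (String × Int))) : Decidable (Spec_class_dict tr_labels out) := by unfold Spec_class_dict; infer_instance

-- ===== CLAIM (what is proved, stated in full; the proofs are below) =====
def Claim_equal_class_dict : Prop := ∀ (tr_labels : List String), Dom_class_dict tr_labels → Spec_class_dict tr_labels (class_dict tr_labels)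

-- ===== LEMMAS AND PROOFS =====

theorem pv_getD_not_contains (d : PySem.Dict String Int) (k : String)
    (h : d.contains k = false) : d.getD k 0 = 0 := by
  simp only [PySem.Dict.contains, List.any_eq_false] at h
  simp only [PySem.Dict.getD, PySem.Dict.get?]
  rw [List.find?_eq_none.mpr (by intro p hp; simpa using h p hp)]
  rfl

theorem pv_size_insert_fresh (d : PySem.Dict String Int) (k : String) (v : Int)
    (h : d.contains k = false) : (d.insert k v).size = d.size + 1 := by
  simp [PySem.Dict.insert, PySem.Dict.size, h]

-- A's branching count loop computes the same dict as an unconditional getD-based loop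
theorem pv_count_fold (xs : List String) :
    ∀ d : PySem.Dict String Int,
      xs.foldl (fun d label => if !(d.contains label) then d.insert label 1
                               else d.insert label (d.getD label 0 + 1)) d
      = xs.foldl (fun d label => d.insert label (d.getD label 0 + 1)) d := by
  induction xs with
  | nil => intro d; rfl
  | cons x xs ih =>
      intro d
      cases h : d.contains x with
      | true => simpa [h] using ih (d.insert x (d.getD x 0 + 1))
      | false => simpa [h, pv_getD_not_contains d x h] using ih (d.insert x 1)

-- ordered-dedup characterisation of Set.ofList's fold
theorem pv_ofList_foldl (xs : List String) :
    ∀ acc : PySem.Set String,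
      List.foldl PySem.Set.add acc xs
      = acc ++ (PySem.Set.ofList xs).filter (fun y => !(PySem.Set.contains acc y)) := by
  induction xs with
  | nil => intro acc; simp [PySem.Set.ofList]
  | cons x xs ih =>
      intro acc
      have hx : (PySem.Set.ofList (x :: xs) : List String)
          = x :: (PySem.Set.ofList xs : List String).filter (fun y => !(y == x)) := by
        show List.foldl PySem.Set.add [x] xs = _
        rw [ih [x], List.singleton_append]
        congr 1
        refine List.filter_congr ?_
        intro y _
        by_cases hyx : y = x
        · subst hyx; simp [PySem.Set.contains]
        · simp [PySem.Set.contains, hyx, beq_eq_false_iff_ne]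
      rw [hx]
      show List.foldl PySem.Set.add (PySem.Set.add acc x) xs = _
      cases h : PySem.Set.contains acc x with
      | true =>
          have ha : PySem.Set.add acc x = acc := by
            unfold PySem.Set.add; rw [h]; rfl
          rw [ha, ih acc]
          congr 1
          rw [List.filter_cons]
          have hPx : (!(PySem.Set.contains acc x)) = false := by rw [h]; rfl
          rw [hPx, if_neg (by simp), List.filter_filter]
          refine (List.filter_congr ?_).symm
          intro y _
          by_cases hyx : y = x
          · subst hyx; simp_all [PySem.Set.contains]
          · simp_all [PySem.Set.contains, beq_eq_false_iff_ne]
      | false =>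
          have ha : PySem.Set.add acc x = acc ++ [x] := by
            unfold PySem.Set.add; rw [h]; rfl
          rw [ha, ih (acc ++ [x])]
          rw [List.filter_cons]
          have hPx : (!(PySem.Set.contains acc x)) = true := by rw [h]; rfl
          rw [hPx, if_pos rfl, List.filter_filter, List.append_assoc, List.singleton_append]
          congr 2
          refine List.filter_congr ?_
          intro y _
          by_cases hyx : y = x
          · subst hyx; simp_all [PySem.Set.contains]
          · simp_all [PySem.Set.contains, beq_eq_false_iff_ne]

theorem pv_ofList_cons (x : String) (xs : List String) :
    (PySem.Set.ofList (x :: xs) : List String)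
    = x :: (PySem.Set.ofList xs : List String).filter (fun y => !(y == x)) := by
  show List.foldl PySem.Set.add [x] xs = _
  rw [pv_ofList_foldl xs [x], List.singleton_append]
  congr 1
  refine List.filter_congr ?_
  intro y _
  by_cases hyx : y = x
  · subst hyx; simp [PySem.Set.contains]
  · simp [PySem.Set.contains, hyx, beq_eq_false_iff_ne]

-- A's index loop over the list equals B's fold over the enumerated fresh keys
theorem pv_idx_fold (xs : List String) :
    ∀ d : PySem.Dict String Int,
      xs.foldl (fun d label => if !(d.contains label) then d.insert label ((d.size : Int)) else d) d
      = (PySem.List.enumerate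
            ((PySem.Set.ofList xs : List String).filter (fun y => !(d.contains y)))
            ((d.size : Int))).foldl (fun d p => d.insert p.2 p.1) d := by
  induction xs with
  | nil => intro d; simp [PySem.Set.ofList, PySem.List.enumerate_nil]
  | cons x xs ih =>
      intro d
      rw [pv_ofList_cons]
      cases h : d.contains x with
      | true =>
          have hfilter :
              ((x :: (PySem.Set.ofList xs : List String).filter (fun y => !(y == x))).filter
                  (fun y => !(d.contains y)))
              = (PySem.Set.ofList xs : List String).filter (fun y => !(d.contains y)) := by
            simp only [List.filter, h, Bool.not_true]
            rw [List.filter_filter]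
            refine List.filter_congr ?_
            intro y _
            cases hyx : y == x with
            | true =>
                have : y = x := eq_of_beq hyx
                subst this
                simp [h]
            | false => simp
          rw [hfilter]
          simpa [h] using ih d
      | false =>
          have hsz : ((d.insert x ((d.size : Int))).size : Int) = (d.size : Int) + 1 := by
            rw [pv_size_insert_fresh d x _ h]; push_cast; ring
          have hfilter :
              ((PySem.Set.ofList xs : List String).filter (fun y => !(y == x))).filter
                  (fun y => !(d.contains y))
              = (PySem.Set.ofList xs : List String).filter
                  (fun y => !((d.insert x ((d.size : Int))).contains y)) := by
            rw [List.filter_filter]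
            refine List.filter_congr ?_
            intro y _
            rw [PySem.Dict.contains_insert]
            cases hyx : y == x <;> cases hy : d.contains y <;> simp
          simp only [List.filter, h, Bool.not_false]
          rw [PySem.List.enumerate_cons]
          simp only [List.foldl_cons]
          have := ih (d.insert x ((d.size : Int)))
          simpa [h, hsz, hfilter] using this

-- ===== VERDICT (by name: the statement is the Claim_ definition above) =====
theorem class_dict_spec : Claim_equal_class_dict := by
  intro xs _
  unfold Spec_class_dict class_dict class_dict_alt
  refine Prod.ext ?_ ?_
  · -- count dicts agree: A's loop is the counter, whose items are exactly
    -- B's per-distinct-key map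
    show (xs.foldl (fun d label => if !(d.contains label) then d.insert label 1
            else d.insert label (d.getD label 0 + 1)) PySem.Dict.empty).items
        = ((PySem.Set.ofList xs : List String).foldl
            (fun d lab => d.insert lab ((PySem.List.count xs lab : Int))) PySem.Dict.empty).items
    rw [pv_count_fold xs PySem.Dict.empty,
        PySem.Dict.foldl_insert_getD_add_one_eq_counter, PySem.Dict.items_counter]
    rw [PySem.Dict.items_foldl_insert_fresh
          (l := (PySem.Set.ofList xs : List String)) (k := fun a => a)
          (v := fun a => (PySem.List.count xs a : Int)) (d := PySem.Dict.empty)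
          (by intro a _; rfl)
          (by simpa using PySem.Set.nodup_ofList xs)]
    simp [PySem.List.count, PySem.Dict.empty]
  · -- index dicts agree via pv_idx_fold at the empty dict
    show (xs.foldl (fun d label => if !(d.contains label) then d.insert label ((d.size : Int)) else d)
            PySem.Dict.empty).items
        = ((PySem.List.enumerate (PySem.Set.ofList xs : List String) 0).foldl
            (fun d p => d.insert p.2 p.1) PySem.Dict.empty).items
    rw [pv_idx_fold xs PySem.Dict.empty]
    have hfe : ((PySem.Set.ofList xs : List String).filter
        (fun y => !((PySem.Dict.empty : PySem.Dict String Int).contains y)))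
        = (PySem.Set.ofList xs : List String) := by
      refine List.filter_eq_self.mpr ?_
      intro y _
      rfl
    rw [hfe]
    norm_num
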